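-- pv_equiv track=rewrite | github.com/stuentofe/workbook_api | api/inserting.py | generate_insertion_problem
-- ===== SOURCE A (Python) =====
-- from typing import List, Dict
--
-- CIRCLED = ["①", "②", "③", "④", "⑤"]
--
-- def generate_insertion_problem(sentences: List[str], insert_index: int) -> Dict[str, str]:
--     n = len(sentences)
--     given = sentences[insert_index]
--     rest = sentences[:insert_index] + sentences[insert_index + 1:]
--     paragraph = []
--     answer = None
--
--     if n == 5:
--         for i in range(len(rest) + 1):
--             if i < 5:
--                 paragraph.append(CIRCLED[i])
--             if i < len(rest):
--                 paragraph.append(rest[i])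
--         answer = CIRCLED[insert_index]
--     else:
--         base = n - 6
--         insertion_points = [base + i for i in range(5)]
--         label_map = {p: CIRCLED[i] for i, p in enumerate(insertion_points)}
--         if insert_index in insertion_points:
--             answer = CIRCLED[insertion_points.index(insert_index)]
--         for i in range(len(rest) + 1):
--             if i in label_map:
--                 paragraph.append(label_map[i])
--             if i < len(rest):
--                 paragraph.append(rest[i])
--
--     text = (
--         "글의 흐름으로 보아, 주어진 문장이 들어가기에 가장 적절한 곳은?\n\n"
--         + given + "\n\n" + " ".join(paragraph)
--     )
--     return {"text": text, "answer": answer}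
-- ===== SOURCE B (Python) =====
-- from typing import List, Dict
--
-- CIRCLED = ["①", "②", "③", "④", "⑤"]
-- HEADER = "글의 흐름으로 보아, 주어진 문장이 들어가기에 가장 적절한 곳은?\n\n"
--
-- def generate_insertion_problem(sentences: List[str], insert_index: int) -> Dict[str, str]:
--     n = len(sentences)
--     j = insert_index + n if insert_index < 0 else insert_index
--     given = sentences[j]
--     tokens = [s for k, s in enumerate(sentences) if k != j]
--     points = list(range(5)) if n == 5 else list(range(n - 6, n - 1))
--     answer = CIRCLED[points.index(j)] if j in points else None
--     for rank, p in sorted(enumerate(points), key=lambda t: t[1], reverse=True):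
--         if 0 <= p <= len(tokens):
--             tokens.insert(p, CIRCLED[rank])
--     return {"text": HEADER + given + "\n\n" + " ".join(tokens), "answer": answer}
-- ===== Notes on version B (the rewrite author's own statement) =====
-- stated objective: alternative
-- what changed: B unifies A's two branches into one insertion-point list and builds the paragraph by inserting each circled marker into the remaining-sentence list at its gap position in descending order, instead of A's gap-by-gap scan with a label dictionary; the answer comes from one points.index lookup instead of two per-branch rules.
-- intended difference: For in-range negative insert_index in the quirk window (insert_index = -1, or -6..-2 with len(sentences) != 5) A keys the slice/answer lookups to the raw negative index, returning a paragraph with sentences duplicated (at -1) or an answer label shifted by len(sentences) (often None); B treats a negative index as the usual position from the end, which is the intended meaning of a Python index, and agrees with A on every other in-range input. — e.g. on generate_insertion_problem(["a", "b"], -1): A returns [("text", some "글의 흐름으로 보아, 주어진 문장이 들어가기에 가장 적절한 곳은?\n\nb\n\n⑤ a a b"), ("answer", some "④")], B returns [("text", some "글의 흐름으로 보아, 주어진 문장이 들어가기에 가장 적절한 곳은?\n\nb\n\n⑤ a"), ("answer", none)]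
import Mathlib
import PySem

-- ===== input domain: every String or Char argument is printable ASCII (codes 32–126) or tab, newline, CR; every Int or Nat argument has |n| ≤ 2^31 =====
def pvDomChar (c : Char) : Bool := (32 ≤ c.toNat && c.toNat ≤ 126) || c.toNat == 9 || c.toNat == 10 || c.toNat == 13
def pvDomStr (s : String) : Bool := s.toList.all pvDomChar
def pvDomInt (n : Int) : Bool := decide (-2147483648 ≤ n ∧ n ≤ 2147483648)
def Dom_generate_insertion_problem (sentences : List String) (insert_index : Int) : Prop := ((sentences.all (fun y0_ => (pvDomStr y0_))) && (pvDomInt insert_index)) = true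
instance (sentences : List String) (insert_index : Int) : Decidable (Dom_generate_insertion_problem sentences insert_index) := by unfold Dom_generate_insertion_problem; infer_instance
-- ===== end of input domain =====

-- B builds the paragraph by inserting the circled markers into the token list (descending
-- positions) from one unified insertion-point list, instead of A's two-branch gap scan with a
-- label dictionary; equivalence is proved outside the negative-index quirk window D_ below.

-- ===== PORT A =====
def pvCIRCLED : List String := ["①", "②", "③", "④", "⑤"]
def pvHeader : String := "글의 흐름으로 보아, 주어진 문장이 들어가기에 가장 적절한 곳은?\n\n"

-- the n == 5 loop of A
def pvParaA5 (rest : List String) : List String :=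
  (PySem.List.pyRange 0 ((rest.length : Int) + 1) 1).foldl
    (fun acc i =>
      let acc1 := if i < 5 then acc ++ [PySem.List.pyGetD pvCIRCLED i ""] else acc
      if i < (rest.length : Int) then acc1 ++ [PySem.List.pyGetD rest i ""] else acc1)
    []

-- the dict comprehension {p: CIRCLED[i] for i, p in enumerate(insertion_points)}
def pvLabelMapA (points : List Int) : PySem.Dict Int String :=
  (PySem.List.enumerate points).foldl
    (fun d ip => d.insert ip.2 (PySem.List.pyGetD pvCIRCLED ip.1 "")) PySem.Dict.empty

-- one step of the else-branch loop of A
def pvStepAElse (label_map : PySem.Dict Int String) (rest : List String)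
    (acc : List String) (i : Int) : List String :=
  let acc1 := match label_map.get? i with
    | some lab => acc ++ [lab]
    | none => acc
  if i < (rest.length : Int) then acc1 ++ [PySem.List.pyGetD rest i ""] else acc1

-- the else-branch loop of A
def pvParaAElse (label_map : PySem.Dict Int String) (rest : List String) : List String :=
  (PySem.List.pyRange 0 ((rest.length : Int) + 1) 1).foldl (pvStepAElse label_map rest) []

-- CIRCLED[insertion_points.index(insert_index)] if insert_index in insertion_points else None
def pvAnswerA (points : List Int) (x : Int) : Option String :=
  if points.contains x then
    match PySem.List.index? points x with
    | some r => PySem.List.pyGet? pvCIRCLED (r : Int)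
    | none => none
  else none

def generate_insertion_problem (sentences : List String) (insert_index : Int) : List (String × Option String) :=
  let n : Int := sentences.length
  match PySem.List.pyGet? sentences insert_index with
  | none => []  -- Python raises IndexError here: outside Pre_
  | some given =>
    let rest : List String :=
      PySem.List.slice sentences none (some insert_index) ++
      PySem.List.slice sentences (some (insert_index + 1)) none
    let pa : List String × Option String :=
      if n = 5 then
        (pvParaA5 rest, PySem.List.pyGet? pvCIRCLED insert_index)
      else
        let base := n - 6
        let insertion_points : List Int := (PySem.List.pyRange 0 5 1).map (fun i => base + i)
        (pvParaAElse (pvLabelMapA insertion_points) rest, pvAnswerA insertion_points insert_index)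
    [("text", some (pvHeader ++ given ++ "\n\n" ++ PySem.Str.join " " pa.1)),
     ("answer", pa.2)]

-- ===== PORT B =====
-- the marker-insertion loop of B: tokens.insert(p, CIRCLED[rank]) over sorted(enumerate(points), reverse)
def pvInsertMarks (points : List Int) (tokens0 : List String) : List String :=
  (PySem.List.sorted (PySem.List.enumerate points) (fun t => t.2) true).foldl
    (fun ts rp =>
      if 0 ≤ rp.2 ∧ rp.2 ≤ (ts.length : Int) then
        PySem.List.insert ts rp.2 (PySem.List.pyGetD pvCIRCLED rp.1 "")
      else ts)
    tokens0

-- CIRCLED[points.index(j)] if j in points else None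
def pvAnswerB (points : List Int) (x : Int) : Option String :=
  if points.contains x then
    match PySem.List.index? points x with
    | some r => PySem.List.pyGet? pvCIRCLED (r : Int)
    | none => none
  else none

def generate_insertion_problem_alt (sentences : List String) (insert_index : Int) : List (String × Option String) :=
  let n : Int := sentences.length
  let j : Int := if insert_index < 0 then insert_index + n else insert_index
  match PySem.List.pyGet? sentences j with
  | none => []  -- IndexError: outside Pre_
  | some given =>
    let tokens0 : List String :=
      ((PySem.List.enumerate sentences).filter (fun kv => kv.1 != j)).map (fun kv => kv.2)
    let points : List Int :=
      if n = 5 then PySem.List.pyRange 0 5 1 else PySem.List.pyRange (n - 6) (n - 1) 1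
    [("text", some (pvHeader ++ given ++ "\n\n" ++ PySem.Str.join " " (pvInsertMarks points tokens0))),
     ("answer", pvAnswerB points j)]

-- ===== PRECONDITION & SPEC =====
-- Pre_ excludes exactly the inputs where sentences[insert_index] raises IndexError.
def Pre_generate_insertion_problem (sentences : List String) (insert_index : Int) : Prop :=
  PySem.Raise.InRange sentences.length insert_index
instance (sentences : List String) (insert_index : Int) : Decidable (Pre_generate_insertion_problem sentences insert_index) := by unfold Pre_generate_insertion_problem; infer_instance

def pvWitness_generate_insertion_problem : List String × Int := (["a", "b", "c", "d", "e"], 2)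

-- For in-range negative insert_index in the quirk window (insert_index = -1, or -6..-2 with
-- len(sentences) ≠ 5) A keys the slice/answer lookups to the raw negative index, returning a
-- paragraph with sentences duplicated (at -1) or an answer label shifted by len(sentences)
-- (often None); B treats a negative index as the usual position from the end, which is the
-- intended meaning of a Python index, and agrees with A on every other in-range input.
def D_generate_insertion_problem (sentences : List String) (insert_index : Int) : Prop :=
  insert_index = -1 ∨ (sentences.length ≠ 5 ∧ -6 ≤ insert_index ∧ insert_index ≤ -2)
instance (sentences : List String) (insert_index : Int) : Decidable (D_generate_insertion_problem sentences insert_index) := by unfold D_generate_insertion_problem; infer_instance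

def Spec_generate_insertion_problem (sentences : List String) (insert_index : Int) (out : List (String × Option String)) : Prop :=
  ¬ D_generate_insertion_problem sentences insert_index → out = generate_insertion_problem_alt sentences insert_index
instance (sentences : List String) (insert_index : Int) (out : List (String × Option String)) : Decidable (Spec_generate_insertion_problem sentences insert_index out) := by unfold Spec_generate_insertion_problem; infer_instance

def pvDiffWitness_generate_insertion_problem : List String × Int := (["a", "b"], -1)
def pvDiffWitnessOut_generate_insertion_problem : (List (String × Option String)) × (List (String × Option String)) :=
  ([("text", some "글의 흐름으로 보아, 주어진 문장이 들어가기에 가장 적절한 곳은?\n\nb\n\n⑤ a a b"), ("answer", some "④")],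
   [("text", some "글의 흐름으로 보아, 주어진 문장이 들어가기에 가장 적절한 곳은?\n\nb\n\n⑤ a"), ("answer", none)])

-- ===== CLAIM (what is proved, stated in full; the proofs are below) =====
def Claim_unchanged_generate_insertion_problem : Prop := ∀ (sentences : List String) (insert_index : Int), Dom_generate_insertion_problem sentences insert_index → Pre_generate_insertion_problem sentences insert_index → Spec_generate_insertion_problem sentences insert_index (generate_insertion_problem sentences insert_index)
def Claim_changed_generate_insertion_problem : Prop := Dom_generate_insertion_problem (pvDiffWitness_generate_insertion_problem.1) (pvDiffWitness_generate_insertion_problem.2) ∧ Pre_generate_insertion_problem (pvDiffWitness_generate_insertion_problem.1) (pvDiffWitness_generate_insertion_problem.2) ∧ D_generate_insertion_problem (pvDiffWitness_generate_insertion_problem.1) (pvDiffWitness_generate_insertion_problem.2) ∧ generate_insertion_problem (pvDiffWitness_generate_insertion_problem.1) (pvDiffWitness_generate_insertion_problem.2) = pvDiffWitnessOut_generate_insertion_problem.1 ∧ generate_insertion_problem_alt (pvDiffWitness_generate_insertion_problem.1) (pvDiffWitness_generate_insertion_problem.2) = pvDiffWitnessOut_generate_insertion_problem.2 ∧ pvDiffWitnessOut_generate_insertion_problem.1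 ≠ pvDiffWitnessOut_generate_insertion_problem.2

-- ===== LEMMAS AND PROOFS =====

theorem pv_pointsA (b : Int) :
    (PySem.List.pyRange 0 5 1).map (fun i => b + i) = [b, b + 1, b + 2, b + 3, b + 4] := by
  have h : PySem.List.pyRange 0 5 1 = [0,1,2,3,4] := by decide
  rw [h]; simp

theorem pv_pointsB (b q : Int) (hq : q = b + 5) :
    PySem.List.pyRange b q 1 = [b, b + 1, b + 2, b + 3, b + 4] := by
  subst hq
  rw [PySem.List.pyRange_one_cons (by omega), PySem.List.pyRange_one_cons (by omega),
      PySem.List.pyRange_one_cons (by omega), PySem.List.pyRange_one_cons (by omega),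
      PySem.List.pyRange_one_cons (by omega), PySem.List.pyRange_one_eq_nil (by omega)]
  simp; omega

theorem pv_points6 (b q : Int) (hq : q = b + 6) :
    PySem.List.pyRange b q 1 = [b, b + 1, b + 2, b + 3, b + 4, b + 5] := by
  subst hq
  rw [PySem.List.pyRange_one_cons (by omega), PySem.List.pyRange_one_cons (by omega),
      PySem.List.pyRange_one_cons (by omega), PySem.List.pyRange_one_cons (by omega),
      PySem.List.pyRange_one_cons (by omega), PySem.List.pyRange_one_cons (by omega),
      PySem.List.pyRange_one_eq_nil (by omega)]
  simp; omega

theorem pv_insert_shift (pre ys : List String) (ti : Int) (v : String) (h0 : 0 ≤ ti)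
    (ht : ti ≤ (ys.length : Int)) :
    PySem.List.insert (pre ++ ys) ((pre.length : Int) + ti) v = pre ++ PySem.List.insert ys ti v := by
  obtain ⟨t, rfl⟩ : ∃ t : Nat, ti = (t : Int) := ⟨ti.toNat, by omega⟩
  rw [show ((pre.length : Int) + (t : Int)) = (((pre.length + t : Nat)) : Int) by push_cast; ring,
      PySem.List.insert_natCast _ _ _ (by simp; omega),
      PySem.List.insert_natCast _ _ _ (by omega)]
  rw [List.take_append, List.drop_append]
  rw [List.take_of_length_le (by omega), List.drop_of_length_le (by omega)]
  simp

theorem pv_labelMap_get (b x : Int) :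
    (pvLabelMapA [b, b + 1, b + 2, b + 3, b + 4]).get? x =
      if x = b + 4 then some "⑤" else if x = b + 3 then some "④" else if x = b + 2 then some "③"
      else if x = b + 1 then some "②" else if x = b then some "①" else none := by
  unfold pvLabelMapA
  simp only [PySem.List.enumerate_cons, PySem.List.enumerate_nil, List.foldl_cons, List.foldl_nil]
  norm_num [PySem.List.pyGetD, PySem.List.pyIdx?, pvCIRCLED, Int.toNat]
  by_cases h4 : x = b + 4
  · subst h4; rw [PySem.Dict.get?_insert_self]; simp
  · rw [PySem.Dict.get?_insert_of_ne _ _ h4]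
    by_cases h3 : x = b + 3
    · subst h3; rw [PySem.Dict.get?_insert_self, if_neg (by omega), if_pos rfl]
    · rw [PySem.Dict.get?_insert_of_ne _ _ h3]
      by_cases h2 : x = b + 2
      · subst h2; rw [PySem.Dict.get?_insert_self, if_neg (by omega), if_neg (by omega), if_pos rfl]
      · rw [PySem.Dict.get?_insert_of_ne _ _ h2]
        by_cases h1 : x = b + 1
        · subst h1; rw [PySem.Dict.get?_insert_self, if_neg (by omega), if_neg (by omega), if_neg (by omega), if_pos rfl]
        · rw [PySem.Dict.get?_insert_of_ne _ _ h1]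
          by_cases h0 : x = b
          · subst h0; rw [PySem.Dict.get?_insert_self, if_neg (by omega), if_neg (by omega), if_neg (by omega), if_neg (by omega), if_pos rfl]
          · rw [PySem.Dict.get?_insert_of_ne _ _ h0, if_neg h4, if_neg h3, if_neg h2, if_neg h1, if_neg h0]
            simp [pysem]

theorem pv_tokens (xs : List String) (jn : Nat) (hj : jn < xs.length) :
    ((PySem.List.enumerate xs).filter (fun kv => kv.1 != (jn : Int))).map (fun kv => kv.2) =
      xs.take jn ++ xs.drop (jn + 1) := by
  have hxs : xs = xs.take jn ++ xs[jn] :: xs.drop (jn + 1) := by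
    conv_lhs => rw [← List.take_append_drop jn xs]
    rw [List.getElem_cons_drop]
  have hlen : (xs.take jn).length = jn := by simp; omega
  conv_lhs => rw [hxs]
  rw [PySem.List.enumerate_append, List.filter_append, List.map_append]
  have p1 : ((PySem.List.enumerate (xs.take jn) 0).filter (fun kv => kv.1 != (jn : Int))) = PySem.List.enumerate (xs.take jn) 0 := by
    apply List.filter_eq_self.2
    intro kv hkv
    obtain ⟨k, hk, rfl⟩ := (PySem.List.mem_enumerate_iff _ _ _).1 hkv
    simp only [bne_iff_ne, ne_eq]
    simp at hk ⊢
    omega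
  rw [p1, PySem.List.map_snd_enumerate]
  rw [PySem.List.enumerate_cons]
  have hst : (0 : Int) + (xs.take jn).length = (jn : Int) := by rw [hlen]; ring
  rw [hst]
  rw [List.filter_cons_of_neg (by simp)]
  have p3 : ((PySem.List.enumerate (xs.drop (jn+1)) ((jn : Int) + 1)).filter (fun kv => kv.1 != (jn : Int))) = PySem.List.enumerate (xs.drop (jn+1)) ((jn : Int) + 1) := by
    apply List.filter_eq_self.2
    intro kv hkv
    obtain ⟨k, hk, rfl⟩ := (PySem.List.mem_enumerate_iff _ _ _).1 hkv
    simp only [bne_iff_ne, ne_eq]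
    omega
  rw [p3, PySem.List.map_snd_enumerate]

theorem pv_answer_none (b x : Int) (hx : x < b) :
    pvAnswerB [b, b + 1, b + 2, b + 3, b + 4] x = none := by
  unfold pvAnswerB
  rw [if_neg]
  simp
  omega

theorem pv_paraB (pre : List String) (a b c d e : String) (p0 q : Int)
    (hp : p0 = (pre.length : Int)) (hq : q = p0 + 5) :
    pvInsertMarks (PySem.List.pyRange p0 q 1) (pre ++ [a, b, c, d, e]) =
      pre ++ ["①", a, "②", b, "③", c, "④", d, "⑤", e] := by
  unfold pvInsertMarks
  rw [pv_pointsB p0 q hq]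
  subst hp
  have he : PySem.List.enumerate [(pre.length : Int), (pre.length : Int)+1, (pre.length : Int)+2, (pre.length : Int)+3, (pre.length : Int)+4] 0
      = [(0,(pre.length : Int)),(1,(pre.length : Int)+1),(2,(pre.length : Int)+2),(3,(pre.length : Int)+3),(4,(pre.length : Int)+4)] := by
    norm_num [PySem.List.enumerate_cons, PySem.List.enumerate_nil]
  rw [he]
  rw [PySem.List.sorted_rev_eq_of_perm_of_pairwise_gt _
        [((4:Int),(pre.length : Int)+4),(3,(pre.length : Int)+3),(2,(pre.length : Int)+2),(1,(pre.length : Int)+1),(0,(pre.length : Int))]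
        _ (by simpa using List.reverse_perm [((0:Int),(pre.length : Int)),(1,(pre.length : Int)+1),(2,(pre.length : Int)+2),(3,(pre.length : Int)+3),(4,(pre.length : Int)+4)])
        (by simp [List.pairwise_cons] <;> omega)]
  have v0 : PySem.List.pyGetD pvCIRCLED (0:Int) "" = "①" := rfl
  have v1 : PySem.List.pyGetD pvCIRCLED (1:Int) "" = "②" := rfl
  have v2 : PySem.List.pyGetD pvCIRCLED (2:Int) "" = "③" := rfl
  have v3 : PySem.List.pyGetD pvCIRCLED (3:Int) "" = "④" := rfl
  have v4 : PySem.List.pyGetD pvCIRCLED (4:Int) "" = "⑤" := rfl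
  have g4 : 0 ≤ (pre.length:Int) + 4 ∧ (pre.length:Int) + 4 ≤ ((pre ++ [a,b,c,d,e]).length : Int) := by
    exact ⟨by positivity, by simp only [List.length_append, List.length_cons, List.length_nil]; push_cast; omega⟩
  have i4 : PySem.List.insert (pre ++ [a,b,c,d,e]) ((pre.length:Int)+4) "⑤" = pre ++ [a,b,c,d,"⑤",e] := by
    rw [pv_insert_shift _ _ _ _ (by norm_num) (by norm_num)]; norm_num [PySem.List.insert_ofNat, Int.toNat]
  have g3 : 0 ≤ (pre.length:Int) + 3 ∧ (pre.length:Int) + 3 ≤ ((pre ++ [a,b,c,d,"⑤",e]).length : Int) := by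
    exact ⟨by positivity, by simp only [List.length_append, List.length_cons, List.length_nil]; push_cast; omega⟩
  have i3 : PySem.List.insert (pre ++ [a,b,c,d,"⑤",e]) ((pre.length:Int)+3) "④" = pre ++ [a,b,c,"④",d,"⑤",e] := by
    rw [pv_insert_shift _ _ _ _ (by norm_num) (by norm_num)]; norm_num [PySem.List.insert_ofNat, Int.toNat]
  have g2 : 0 ≤ (pre.length:Int) + 2 ∧ (pre.length:Int) + 2 ≤ ((pre ++ [a,b,c,"④",d,"⑤",e]).length : Int) := by
    exact ⟨by positivity, by simp only [List.length_append, List.length_cons, List.length_nil]; push_cast; omega⟩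
  have i2 : PySem.List.insert (pre ++ [a,b,c,"④",d,"⑤",e]) ((pre.length:Int)+2) "③" = pre ++ [a,b,"③",c,"④",d,"⑤",e] := by
    rw [pv_insert_shift _ _ _ _ (by norm_num) (by norm_num)]; norm_num [PySem.List.insert_ofNat, Int.toNat]
  have g1 : 0 ≤ (pre.length:Int) + 1 ∧ (pre.length:Int) + 1 ≤ ((pre ++ [a,b,"③",c,"④",d,"⑤",e]).length : Int) := by
    exact ⟨by positivity, by simp only [List.length_append, List.length_cons, List.length_nil]; push_cast; omega⟩
  have i1 : PySem.List.insert (pre ++ [a,b,"③",c,"④",d,"⑤",e]) ((pre.length:Int)+1) "②" = pre ++ [a,"②",b,"③",c,"④",d,"⑤",e] := by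
    rw [pv_insert_shift _ _ _ _ (by norm_num) (by norm_num)]; norm_num [PySem.List.insert_ofNat, Int.toNat]
  have g0 : 0 ≤ (pre.length:Int) ∧ (pre.length:Int) ≤ ((pre ++ [a,"②",b,"③",c,"④",d,"⑤",e]).length : Int) := by
    exact ⟨by positivity, by simp only [List.length_append, List.length_cons, List.length_nil]; push_cast; omega⟩
  have i0 : PySem.List.insert (pre ++ [a,"②",b,"③",c,"④",d,"⑤",e]) ((pre.length:Int)) "①" = pre ++ ["①",a,"②",b,"③",c,"④",d,"⑤",e] := by
    rw [show ((pre.length:Int)) = (pre.length:Int) + 0 by ring,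
        pv_insert_shift _ _ _ _ (by norm_num) (by norm_num), PySem.List.insert_zero]
  simp only [List.foldl_cons, List.foldl_nil, v0, v1, v2, v3, v4,
    if_pos g4, i4, if_pos g3, i3, if_pos g2, i2, if_pos g1, i1, if_pos g0, i0]
theorem pv_paraA (pre : List String) (a b c d e : String) (base : Int)
    (hb : base = (pre.length : Int)) :
    pvParaAElse (pvLabelMapA ((PySem.List.pyRange 0 5 1).map (fun i => base + i)))
        (pre ++ [a, b, c, d, e]) =
      pre ++ ["①", a, "②", b, "③", c, "④", d, "⑤", e] := by
  unfold pvParaAElse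
  rw [pv_pointsA base]
  subst hb
  have hL : (((pre ++ [a,b,c,d,e]).length : Nat) : Int) = (pre.length : Int) + 5 := by
    simp only [List.length_append, List.length_cons, List.length_nil]; push_cast; ring
  rw [hL]
  rw [PySem.List.pyRange_one_append 0 ((pre.length : Int)) ((pre.length : Int) + 5 + 1) (by positivity) (by omega),
      List.foldl_append]
  have hpart1 : (PySem.List.pyRange 0 ((pre.length : Int)) 1).foldl
      (pvStepAElse (pvLabelMapA [(pre.length : Int), (pre.length : Int) + 1, (pre.length : Int) + 2, (pre.length : Int) + 3, (pre.length : Int) + 4]) (pre ++ [a,b,c,d,e])) [] = pre := by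
    rw [PySem.List.foldl_congr_mem _ _
          (fun (acc : List String) (x : Int) => acc ++ [PySem.List.pyGetD pre x ""]) _ (by
      intro acc x hx
      have hxx := (PySem.List.mem_pyRange_one).1 hx
      have hgd : PySem.List.pyGetD (pre ++ [a,b,c,d,e]) x "" = PySem.List.pyGetD pre x "" := by
        obtain ⟨t, rfl⟩ : ∃ t : Nat, x = (t : Int) := ⟨x.toNat, by omega⟩
        rw [PySem.List.pyGetD_natCast, PySem.List.pyGetD_natCast]
        rw [List.getD_append _ _ _ _ (by omega)]
      unfold pvStepAElse
      rw [pv_labelMap_get,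
          if_neg (show ¬(x = (pre.length:Int) + 4) from by omega),
          if_neg (show ¬(x = (pre.length:Int) + 3) from by omega),
          if_neg (show ¬(x = (pre.length:Int) + 2) from by omega),
          if_neg (show ¬(x = (pre.length:Int) + 1) from by omega),
          if_neg (show ¬(x = (pre.length:Int)) from by omega)]
      simp [hgd]
      omega)]
    rw [PySem.List.foldl_pyRange_zero_pyGetD' pre "" (fun acc x => acc ++ [x]) []]
    rw [PySem.List.foldl_append_singleton_eq_self]
    simp only [List.nil_append]
  rw [hpart1]
  rw [pv_points6 ((pre.length : Int)) ((pre.length : Int) + 5 + 1) (by ring)]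
  have w0 : PySem.List.pyGetD (pre ++ [a,b,c,d,e]) ((pre.length : Int)) "" = a := by
    rw [show ((pre.length:Int)) = (((pre.length : Nat) : Int)) from rfl, PySem.List.pyGetD_natCast]; simp
  have w1 : PySem.List.pyGetD (pre ++ [a,b,c,d,e]) ((pre.length : Int) + 1) "" = b := by
    rw [show ((pre.length:Int) + 1) = (((pre.length + 1 : Nat) : Int)) from by push_cast; ring, PySem.List.pyGetD_natCast]; simp
  have w2 : PySem.List.pyGetD (pre ++ [a,b,c,d,e]) ((pre.length : Int) + 2) "" = c := by
    rw [show ((pre.length:Int) + 2) = (((pre.length + 2 : Nat) : Int)) from by push_cast; ring, PySem.List.pyGetD_natCast]; simp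
  have w3 : PySem.List.pyGetD (pre ++ [a,b,c,d,e]) ((pre.length : Int) + 3) "" = d := by
    rw [show ((pre.length:Int) + 3) = (((pre.length + 3 : Nat) : Int)) from by push_cast; ring, PySem.List.pyGetD_natCast]; simp
  have w4 : PySem.List.pyGetD (pre ++ [a,b,c,d,e]) ((pre.length : Int) + 4) "" = e := by
    rw [show ((pre.length:Int) + 4) = (((pre.length + 4 : Nat) : Int)) from by push_cast; ring, PySem.List.pyGetD_natCast]; simp
  simp only [List.foldl_cons, List.foldl_nil]
  unfold pvStepAElse
  simp [pv_labelMap_get, hL, w0, w1, w2, w3, w4, add_right_inj, add_lt_add_iff_left,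
    left_eq_add, add_eq_left, lt_add_iff_pos_right, List.append_assoc]
theorem pv_len5 (ys : List String) (h : ys.length = 5) : ∃ a b c d e, ys = [a,b,c,d,e] := by
  rcases ys with _ | ⟨a, ys⟩; · simp at h
  rcases ys with _ | ⟨b, ys⟩; · simp at h
  rcases ys with _ | ⟨c, ys⟩; · simp at h
  rcases ys with _ | ⟨d, ys⟩; · simp at h
  rcases ys with _ | ⟨e, ys⟩; · simp at h
  rcases ys with _ | ⟨f, ys⟩
  · exact ⟨a, b, c, d, e, rfl⟩
  · simp at h

theorem pv_split5 (xs : List String) (h : 5 ≤ xs.length) :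
    ∃ pre a b c d e, xs = pre ++ [a,b,c,d,e] ∧ pre.length = xs.length - 5 := by
  have hd : (xs.drop (xs.length - 5)).length = 5 := by simp; omega
  obtain ⟨a, b, c, d, e, he⟩ := pv_len5 _ hd
  refine ⟨xs.take (xs.length - 5), a, b, c, d, e, ?_, by simp⟩
  rw [← he, List.take_append_drop]

theorem pv_answerAB (ps : List Int) (x : Int) : pvAnswerA ps x = pvAnswerB ps x := rfl

set_option maxHeartbeats 2000000 in
theorem pv_main : ∀ (sentences : List String) (insert_index : Int), Pre_generate_insertion_problem sentences insert_index → ¬ D_generate_insertion_problem sentences insert_index → generate_insertion_problem sentences insert_index = generate_insertion_problem_alt sentences insert_index := by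
  intro sentences i hpre hD
  obtain ⟨hlo, hhi⟩ := hpre
  have hD1 : i ≠ -1 := fun h => hD (Or.inl h)
  have hD2 : sentences.length = 5 ∨ i < -6 ∨ -2 < i := by
    by_cases hl : sentences.length = 5
    · exact Or.inl hl
    · have hni : ¬(-6 ≤ i ∧ i ≤ -2) := fun hc => hD (Or.inr ⟨hl, hc.1, hc.2⟩)
      omega
  by_cases h6 : 6 ≤ sentences.length
  · have h5 : ¬((sentences.length : Int) = 5) := by omega
    have hi : 0 ≤ i ∨ i ≤ -7 := by omega
    obtain ⟨jn, hjn, hji⟩ : ∃ jn : Nat, jn < sentences.length ∧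
        (if i < 0 then i + (sentences.length : Int) else i) = (jn : Int) := by
      rcases hi with h | h
      · exact ⟨i.toNat, by omega, by rw [if_neg (by omega)]; omega⟩
      · exact ⟨(i + sentences.length).toNat, by omega, by rw [if_pos (by omega)]; omega⟩
    have hgB : PySem.List.pyGet? sentences (if i < 0 then i + (sentences.length : Int) else i)
        = some sentences[jn] := by
      rw [hji, PySem.List.pyGet?_natCast, List.getElem?_eq_getElem hjn]
    have hgA : PySem.List.pyGet? sentences i = some sentences[jn] := by
      rcases hi with h | h
      · have hii : i = (jn : Int) := by rw [if_neg (by omega)] at hji; exact hji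
        rw [hii, PySem.List.pyGet?_natCast, List.getElem?_eq_getElem hjn]
      · have hik : (jn : Int) = i + sentences.length := by rw [if_pos (by omega)] at hji; omega
        have hk : i = -(((sentences.length - jn : Nat)) : Int) := by push_cast; omega
        rw [hk, PySem.List.pyGet?_neg_natCast _ _ (by omega) (by omega),
            show sentences.length - (sentences.length - jn) = jn from by omega,
            List.getElem?_eq_getElem hjn]
    have hrest : PySem.List.slice sentences none (some i) ++
        PySem.List.slice sentences (some (i + 1)) none
        = sentences.take jn ++ sentences.drop (jn + 1) := by
      rcases hi with h | h
      · have hii : i = (jn : Int) := by rw [if_neg (by omega)] at hji; exact hji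
        rw [PySem.List.slice_to _ (by omega), PySem.List.slice_from _ (by omega)]
        congr 1
        · congr 1; omega
        · congr 1; omega
      · have hik : (jn : Int) = i + sentences.length := by rw [if_pos (by omega)] at hji; omega
        have hk : i = -(((sentences.length - jn : Nat)) : Int) := by push_cast; omega
        rw [hk]
        rw [show -(((sentences.length - jn : Nat)) : Int) + 1 = -(((sentences.length - jn - 1 : Nat)) : Int) from by push_cast; omega]
        rw [PySem.List.slice_to_neg_natCast _ _ (by omega),
            PySem.List.slice_from_neg_natCast _ _ (by omega)]
        congr 1
        · congr 1; omega
        · congr 1; omega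
    have htok : ((PySem.List.enumerate sentences).filter
          (fun kv => kv.1 != (if i < 0 then i + (sentences.length : Int) else i))).map (fun kv => kv.2)
        = sentences.take jn ++ sentences.drop (jn + 1) := by
      simp only [hji]
      exact pv_tokens sentences jn hjn
    obtain ⟨pre, a, b, c, d, e, hsplit, hprelen⟩ :=
      pv_split5 (sentences.take jn ++ sentences.drop (jn + 1)) (by simp; omega)
    have hpl : ((sentences.length : Int)) - 6 = (pre.length : Int) := by
      have h1 : (sentences.take jn ++ sentences.drop (jn + 1)).length = sentences.length - 1 := by
        simp; omega
      rw [h1] at hprelen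
      omega
    simp only [generate_insertion_problem, generate_insertion_problem_alt, hgA, hgB,
      if_neg h5, hrest, htok, hsplit]
    rw [pv_paraA pre a b c d e ((sentences.length : Int) - 6) hpl,
        pv_paraB pre a b c d e ((sentences.length : Int) - 6) ((sentences.length : Int) - 1) hpl (by ring)]
    rw [pv_pointsA ((sentences.length : Int) - 6),
        pv_pointsB ((sentences.length : Int) - 6) ((sentences.length : Int) - 1) (by ring), hji]
    rcases hi with h | h
    · have hii : i = (jn : Int) := by rw [if_neg (by omega)] at hji; exact hji
      rw [hii, pv_answerAB]
    · have hik : (jn : Int) = i + sentences.length := by rw [if_pos (by omega)] at hji; omega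
      rw [pv_answerAB,
          pv_answer_none _ i (by omega),
          pv_answer_none _ ((jn : Nat) : Int) (by omega)]
  · -- sentences.length ≤ 5: finitely many shapes and indices
    rcases sentences with _ | ⟨s0, tail⟩
    · simp at hhi hlo; omega
    · rcases tail with _ | ⟨s1, tail⟩
      · simp only [List.length_cons, List.length_nil] at hlo hhi
        norm_num at hlo hhi
        interval_cases i <;>
          first
            | (exact absurd rfl hD1)
            | ((exfalso; apply hD; right; refine ⟨?_, ?_, ?_⟩ <;> simp); done)
            | (simp [Int.reduceNeg, generate_insertion_problem, generate_insertion_problem_alt,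
                    pvParaA5, pvStepAElse, pvParaAElse, pvLabelMapA, pvAnswerA, pvAnswerB, pvInsertMarks,
                    PySem.List.pyGet?, PySem.List.pyIdx?, PySem.List.slice, PySem.List.clampIdx,
                    PySem.List.pyGetD, PySem.List.enumerate_cons, PySem.List.enumerate_nil,
                    PySem.List.pyRange_one_cons, PySem.List.pyRange_one_eq_nil,
                    PySem.List.sorted, PySem.List.insertBy, PySem.List.insert_ofNat, PySem.List.insert_zero,
                    Int.toNat, List.idxOf?, List.findIdx?, List.findIdx?.go,
                    PySem.Dict.get?_insert_self, PySem.Dict.get?_insert_of_ne, PySem.Dict.get?, PySem.Dict.insert, PySem.Dict.empty,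
                    pvCIRCLED])
      · rcases tail with _ | ⟨s2, tail⟩
        · simp only [List.length_cons, List.length_nil] at hlo hhi
          norm_num at hlo hhi
          interval_cases i <;>
            first
              | (exact absurd rfl hD1)
              | ((exfalso; apply hD; right; refine ⟨?_, ?_, ?_⟩ <;> simp); done)
              | (simp [Int.reduceNeg, generate_insertion_problem, generate_insertion_problem_alt,
                    pvParaA5, pvStepAElse, pvParaAElse, pvLabelMapA, pvAnswerA, pvAnswerB, pvInsertMarks,
                    PySem.List.pyGet?, PySem.List.pyIdx?, PySem.List.slice, PySem.List.clampIdx,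
                    PySem.List.pyGetD, PySem.List.enumerate_cons, PySem.List.enumerate_nil,
                    PySem.List.pyRange_one_cons, PySem.List.pyRange_one_eq_nil,
                    PySem.List.sorted, PySem.List.insertBy, PySem.List.insert_ofNat, PySem.List.insert_zero,
                    Int.toNat, List.idxOf?, List.findIdx?, List.findIdx?.go,
                    PySem.Dict.get?_insert_self, PySem.Dict.get?_insert_of_ne, PySem.Dict.get?, PySem.Dict.insert, PySem.Dict.empty,
                    pvCIRCLED])
        · rcases tail with _ | ⟨s3, tail⟩
          · simp only [List.length_cons, List.length_nil] at hlo hhi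
            norm_num at hlo hhi
            interval_cases i <;>
              first
                | (exact absurd rfl hD1)
                | ((exfalso; apply hD; right; refine ⟨?_, ?_, ?_⟩ <;> simp); done)
                | (simp [Int.reduceNeg, generate_insertion_problem, generate_insertion_problem_alt,
                    pvParaA5, pvStepAElse, pvParaAElse, pvLabelMapA, pvAnswerA, pvAnswerB, pvInsertMarks,
                    PySem.List.pyGet?, PySem.List.pyIdx?, PySem.List.slice, PySem.List.clampIdx,
                    PySem.List.pyGetD, PySem.List.enumerate_cons, PySem.List.enumerate_nil,
                    PySem.List.pyRange_one_cons, PySem.List.pyRange_one_eq_nil,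
                    PySem.List.sorted, PySem.List.insertBy, PySem.List.insert_ofNat, PySem.List.insert_zero,
                    Int.toNat, List.idxOf?, List.findIdx?, List.findIdx?.go,
                    PySem.Dict.get?_insert_self, PySem.Dict.get?_insert_of_ne, PySem.Dict.get?, PySem.Dict.insert, PySem.Dict.empty,
                    pvCIRCLED])
          · rcases tail with _ | ⟨s4, tail⟩
            · simp only [List.length_cons, List.length_nil] at hlo hhi
              norm_num at hlo hhi
              interval_cases i <;>
                first
                  | (exact absurd rfl hD1)
                  | ((exfalso; apply hD; right; refine ⟨?_, ?_, ?_⟩ <;> simp); done)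
                  | (simp [Int.reduceNeg, generate_insertion_problem, generate_insertion_problem_alt,
                    pvParaA5, pvStepAElse, pvParaAElse, pvLabelMapA, pvAnswerA, pvAnswerB, pvInsertMarks,
                    PySem.List.pyGet?, PySem.List.pyIdx?, PySem.List.slice, PySem.List.clampIdx,
                    PySem.List.pyGetD, PySem.List.enumerate_cons, PySem.List.enumerate_nil,
                    PySem.List.pyRange_one_cons, PySem.List.pyRange_one_eq_nil,
                    PySem.List.sorted, PySem.List.insertBy, PySem.List.insert_ofNat, PySem.List.insert_zero,
                    Int.toNat, List.idxOf?, List.findIdx?, List.findIdx?.go,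
                    PySem.Dict.get?_insert_self, PySem.Dict.get?_insert_of_ne, PySem.Dict.get?, PySem.Dict.insert, PySem.Dict.empty,
                    pvCIRCLED])
            · rcases tail with _ | ⟨s5, tail⟩
              · simp only [List.length_cons, List.length_nil] at hlo hhi
                norm_num at hlo hhi
                interval_cases i <;>
                  first
                    | (exact absurd rfl hD1)
                    | ((exfalso; apply hD; right; refine ⟨?_, ?_, ?_⟩ <;> simp); done)
                    | (simp [Int.reduceNeg, generate_insertion_problem, generate_insertion_problem_alt,
                    pvParaA5, pvStepAElse, pvParaAElse, pvLabelMapA, pvAnswerA, pvAnswerB, pvInsertMarks,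
                    PySem.List.pyGet?, PySem.List.pyIdx?, PySem.List.slice, PySem.List.clampIdx,
                    PySem.List.pyGetD, PySem.List.enumerate_cons, PySem.List.enumerate_nil,
                    PySem.List.pyRange_one_cons, PySem.List.pyRange_one_eq_nil,
                    PySem.List.sorted, PySem.List.insertBy, PySem.List.insert_ofNat, PySem.List.insert_zero,
                    Int.toNat, List.idxOf?, List.findIdx?, List.findIdx?.go,
                    PySem.Dict.get?_insert_self, PySem.Dict.get?_insert_of_ne, PySem.Dict.get?, PySem.Dict.insert, PySem.Dict.empty,
                    pvCIRCLED])
              · exact absurd (by simp) h6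

-- ===== VERDICT (by name: the statement is the Claim_ definition above) =====
theorem generate_insertion_problem_spec : Claim_unchanged_generate_insertion_problem := by
  intro sentences i _dom hpre hD
  exact pv_main sentences i hpre hD

theorem generate_insertion_problem_changed : Claim_changed_generate_insertion_problem := by
  unfold Claim_changed_generate_insertion_problem; decide
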